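-- pv_equiv track=rewrite | github.com/sambowyer/tournaments | utils.py | combineRankings
-- ===== SOURCE A (Python) =====
-- from typing import List, Generator
--
-- def combineRankings(rankings : List[List[List[int]]]) -> List[List[int]]:
--     '''Combines multiple rankings into a single ranking based on a weighted-sum of positions for each player'''
--     # For each ranking we assign 0 points for winning, 1 point for second place etc. and then create our final ranking on these points
--     totalPoints = [0 for i in range(len(rankings[0]))]
--     for ranking in rankings:
--         for points, position in enumerate(ranking):
--             for player in position:
--                 totalPoints[player] += points
--
--     newRanking = [i for i in range(len(rankings[0]))]
--     newRanking.sort(key=lambda x: totalPoints[x])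
--
--     # Now go through newRanking and combine any adjacent players who have the same number of points
--     actualNewRanking = []
--     currentPlayers = [newRanking[0]]
--     for player in newRanking[1:]:
--         if len(currentPlayers) == 0 or totalPoints[player] == totalPoints[currentPlayers[0]]:
--             currentPlayers.append(player)
--         else:
--             actualNewRanking.append(currentPlayers)
--             for _ in range(len(currentPlayers)-1):
--                 actualNewRanking.append([])
--             currentPlayers = [player]
--
--     actualNewRanking.append(currentPlayers)
--     for _ in range(len(currentPlayers)-1):
--         actualNewRanking.append([])
--
--     return actualNewRanking
-- ===== SOURCE B (Python) =====
-- from typing import List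
--
-- def combineRankings(rankings : List[List[List[int]]]) -> List[List[int]]:
--     '''Combines multiple rankings into a single ranking based on a weighted-sum of positions for each player'''
--     totalPoints = [0 for i in range(len(rankings[0]))]
--     for ranking in rankings:
--         for points, position in enumerate(ranking):
--             for player in position:
--                 totalPoints[player] += points
--
--     # Bucket players by their point total (players visited in index order,
--     # matching the stable sort), then emit buckets by ascending total with
--     # len(bucket)-1 empty padding lists after each bucket.
--     buckets = {}
--     for player, pts in enumerate(totalPoints):
--         buckets.setdefault(pts, []).append(player)
--
--     result = []
--     for pts in sorted(buckets):
--         group = buckets[pts]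
--         result.append(group)
--         result += [[] for _ in range(len(group) - 1)]
--     return result
-- ===== Notes on version B (the rewrite author's own statement) =====
-- stated objective: alternative
-- what changed: Replaces A's stable sort of all players followed by an adjacent-equal-points scan with a dict bucketing players by point total (in index order) and emitting buckets by ascending total, each followed by its padding of empty lists.
import Mathlib
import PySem

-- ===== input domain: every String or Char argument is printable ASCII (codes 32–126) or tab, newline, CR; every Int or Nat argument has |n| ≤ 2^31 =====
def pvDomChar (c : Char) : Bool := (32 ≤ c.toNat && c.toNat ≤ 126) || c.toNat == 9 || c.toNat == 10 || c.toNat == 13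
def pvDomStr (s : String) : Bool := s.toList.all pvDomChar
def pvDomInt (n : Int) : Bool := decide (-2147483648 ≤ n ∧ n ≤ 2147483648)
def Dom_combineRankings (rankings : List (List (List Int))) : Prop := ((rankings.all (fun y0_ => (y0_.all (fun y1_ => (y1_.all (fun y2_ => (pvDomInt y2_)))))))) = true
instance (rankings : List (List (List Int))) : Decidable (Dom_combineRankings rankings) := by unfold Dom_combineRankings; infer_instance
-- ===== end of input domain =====

-- B replaces A's sort-all-players-then-scan-adjacent-runs grouping by a dict bucketing
-- players per point total and emitting buckets in ascending key order (alternative algorithm, same cost class).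


-- ===== PORT A =====
-- the triple loop filling totalPoints — textually identical in A and in B, so shared
def pvTotals (rankings : List (List (List Int))) : List Int :=
  rankings.foldl
    (fun tp ranking =>
      (PySem.List.enumerate ranking).foldl
        (fun tp pp =>
          pp.2.foldl (fun tp player =>
            PySem.List.pySetD tp player (PySem.List.pyGetD tp player 0 + pp.1)) tp)
        tp)
    ((PySem.List.pyRange 0 ((PySem.List.pyGetD rankings 0 []).length : Int)).map (fun _ => (0 : Int)))

-- '[[] for _ in range(len(cur)-1)]' — the padding comprehension, identical in A and B
def pvPad (cur : List Int) : List (List Int) :=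
  (PySem.List.pyRange 0 ((cur.length : Int) - 1)).map (fun _ => ([] : List Int))

-- the body of A's merging loop over newRanking[1:]
def pvStepA (tp : List Int) (s : List (List Int) × List Int) (player : Int) :
    List (List Int) × List Int :=
  if s.2.length == 0 ||
      (PySem.List.pyGetD tp player 0 == PySem.List.pyGetD tp (PySem.List.pyGetD s.2 0 0) 0)
  then (s.1, s.2 ++ [player])
  else (s.1 ++ [s.2] ++ pvPad s.2, [player])

def combineRankings (rankings : List (List (List Int))) : List (List Int) :=
  let tp := pvTotals rankings
  let newRanking :=
    PySem.List.sorted (PySem.List.pyRange 0 ((PySem.List.pyGetD rankings 0 []).length : Int))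
      (fun x => PySem.List.pyGetD tp x 0)
  let s := (PySem.List.slice newRanking (some 1) none).foldl (pvStepA tp)
      ([], [PySem.List.pyGetD newRanking 0 0])
  s.1 ++ [s.2] ++ pvPad s.2

-- ===== PORT B =====
def combineRankings_alt (rankings : List (List (List Int))) : List (List Int) :=
  let tp := pvTotals rankings
  -- buckets.setdefault(pts, []).append(player)
  let buckets := (PySem.List.enumerate tp).foldl
      (fun (d : PySem.Dict Int (List Int)) pp => d.modify pp.2 [] (fun l => l ++ [pp.1]))
      PySem.Dict.empty
  (PySem.List.sorted buckets.keys (fun v => v)).foldl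
    (fun result pts =>
      let group := buckets.getD pts []
      result ++ [group] ++ pvPad group)
    []

-- ===== PRECONDITION & SPEC =====
-- Pre_ excludes exactly the inputs where A raises IndexError: empty rankings / an empty first
-- ranking (rankings[0] determines the player count) and player indices outside [-N, N).
def Pre_combineRankings (rankings : List (List (List Int))) : Prop :=
  rankings ≠ [] ∧ (PySem.List.pyGetD rankings 0 []).length ≠ 0 ∧
  ∀ ranking ∈ rankings, ∀ position ∈ ranking, ∀ player ∈ position,
    PySem.Raise.InRange (PySem.List.pyGetD rankings 0 []).length player
instance (rankings : List (List (List Int))) : Decidable (Pre_combineRankings rankings) := by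
  unfold Pre_combineRankings; infer_instance

def pvWitness_combineRankings : List (List (List Int)) := [[[0], [1]]]

def Spec_combineRankings (rankings : List (List (List Int))) (out : List (List Int)) : Prop := out = combineRankings_alt rankings
instance (rankings : List (List (List Int))) (out : List (List Int)) : Decidable (Spec_combineRankings rankings out) := by unfold Spec_combineRankings; infer_instance

-- ===== CLAIM (what is proved, stated in full; the proofs are below) =====
def Claim_equal_combineRankings : Prop := ∀ (rankings : List (List (List Int))), Dom_combineRankings rankings → Pre_combineRankings rankings → Spec_combineRankings rankings (combineRankings rankings)

-- ===== LEMMAS AND PROOFS =====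

-- pvTotals preserves the length of the accumulator list
theorem pv_foldl_len {β : Type} (f : List Int → β → List Int)
    (h : ∀ tp b, (f tp b).length = tp.length) :
    ∀ (l : List β) (tp : List Int), (l.foldl f tp).length = tp.length := by
  intro l
  induction l with
  | nil => intro tp; rfl
  | cons b l ih => intro tp; simp only [List.foldl_cons, ih, h]

theorem pvTotals_length (rankings : List (List (List Int))) :
    (pvTotals rankings).length = (PySem.List.pyGetD rankings 0 []).length := by
  unfold pvTotals
  rw [pv_foldl_len]
  · simp [PySem.List.length_pyRange_one]
  · intro tp r
    rw [pv_foldl_len]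
    intro tp pp
    rw [pv_foldl_len]
    intro tp p
    exact PySem.List.length_pySetD tp p _

-- insertBy unfolding equations
theorem insertBy_nil {α : Type} (bf : α → α → Bool) (x : α) :
    PySem.List.insertBy bf x [] = [x] := rfl

theorem insertBy_cons {α : Type} (bf : α → α → Bool) (x y : α) (ys : List α) :
    PySem.List.insertBy bf x (y :: ys) =
      if bf x y then x :: y :: ys else y :: PySem.List.insertBy bf x ys := by
  simp [PySem.List.insertBy]

theorem insertBy_append_false {α : Type} (bf : α → α → Bool) (x : α) (L M : List α)
    (h : ∀ y ∈ L, bf x y = false) :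
    PySem.List.insertBy bf x (L ++ M) = L ++ PySem.List.insertBy bf x M := by
  induction L with
  | nil => simp
  | cons y L ih =>
      have hy : bf x y = false := h y (by simp)
      simp only [List.cons_append, insertBy_cons, hy, Bool.false_eq_true, if_false]
      rw [ih (fun z hz => h z (by simp [hz]))]

theorem insertBy_eq_cons {α : Type} (bf : α → α → Bool) (x : α) (M : List α)
    (h : ∀ y t, M = y :: t → bf x y = true) :
    PySem.List.insertBy bf x M = x :: M := by
  cases M with
  | nil => rfl
  | cons y t => simp [insertBy_cons, h y t rfl]

-- insertion of a value into a strictly increasing list of distinct values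
def insVal (u : Int) : List Int → List Int
  | [] => [u]
  | v :: V => if u < v then u :: v :: V else if u = v then v :: V else v :: insVal u V

theorem mem_insVal (u : Int) (V : List Int) (y : Int) :
    y ∈ insVal u V ↔ y = u ∨ y ∈ V := by
  induction V with
  | nil => simp [insVal]
  | cons v V ih =>
      by_cases h1 : u < v
      · simp [insVal, h1]
      · by_cases h2 : u = v
        · subst h2
          simp only [insVal, lt_self_iff_false, if_false, if_true, List.mem_cons]
          tauto
        · simp [insVal, h1, h2, ih]
          tauto

theorem pairwise_insVal (u : Int) (V : List Int) (hV : V.Pairwise (· < ·)) :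
    (insVal u V).Pairwise (· < ·) := by
  induction V with
  | nil => simp [insVal]
  | cons v V ih =>
      rcases List.pairwise_cons.mp hV with ⟨hv, hV'⟩
      by_cases h1 : u < v
      · simp only [insVal, h1, if_true]
        refine List.pairwise_cons.mpr ⟨?_, hV⟩
        intro y hy
        rcases List.mem_cons.mp hy with rfl | h
        · omega
        · exact lt_trans h1 (hv y h)
      · by_cases h2 : u = v
        · simpa [insVal, h1, h2] using hV
        · simp only [insVal, h1, h2, if_false]
          refine List.pairwise_cons.mpr ⟨?_, ih hV'⟩
          intro y hy
          rcases (mem_insVal u V y).mp hy with rfl | h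
          · omega
          · exact hv y h

-- inserting one more value: sorted(set(l ++ [u])) = insVal u (sorted(set l))
theorem sorted_set_append (l : List Int) (u : Int) :
    PySem.List.sorted (PySem.Set.ofList (l ++ [u])) (fun v => v) =
      insVal u (PySem.List.sorted (PySem.Set.ofList l) (fun v => v)) := by
  apply PySem.List.sorted_eq_of_perm_of_pairwise_lt
  · have hnd : (insVal u (PySem.List.sorted (PySem.Set.ofList l) (fun v => v))).Nodup := by
      have := pairwise_insVal u _ (PySem.List.sorted_ofList_pairwise_lt l)
      exact this.imp (fun h => ne_of_lt h)
    refine (List.perm_ext_iff_of_nodup hnd (PySem.Set.nodup_ofList _)).mpr ?_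
    intro a
    rw [mem_insVal, PySem.List.mem_sorted, PySem.Set.mem_ofList, PySem.Set.mem_ofList]
    simp
    tauto
  · exact pairwise_insVal u _ (PySem.List.sorted_ofList_pairwise_lt l)

-- stable insertion into a flatMap of key-groups
theorem insertBy_flat (key : Int → Int) (x : Int) (V : List Int) (g : Int → List Int)
    (hV : V.Pairwise (· < ·))
    (hkey : ∀ v ∈ V, ∀ a ∈ g v, key a = v)
    (hne : ∀ v ∈ V, g v ≠ [])
    (hgu : key x ∉ V → g (key x) = []) :
    PySem.List.insertBy (fun a b => decide (key a < key b)) x (V.flatMap g) =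
      (insVal (key x) V).flatMap (fun v => if v = key x then g v ++ [x] else g v) := by
  induction V with
  | nil =>
      simp [insVal, insertBy_nil, hgu (by simp)]
  | cons v V ih =>
      rcases List.pairwise_cons.mp hV with ⟨hv, hV'⟩
      have hgv : ∀ a ∈ g v, key a = v := hkey v (by simp)
      rcases lt_trichotomy (key x) v with h1 | h1 | h1
      · -- key x < v : x becomes its own fresh group at the front
        have hnotin : key x ∉ V := fun h => absurd (hv _ h) (by omega)
        have hgx : g (key x) = [] := hgu (by
          intro h
          rcases List.mem_cons.mp h with h' | h'
          · omega
          · exact hnotin h')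
        have hhead : PySem.List.insertBy (fun a b => decide (key a < key b)) x
            ((v :: V).flatMap g) = x :: (v :: V).flatMap g := by
          apply insertBy_eq_cons
          intro y t hyt
          have hy : y ∈ (v :: V).flatMap g := by rw [hyt]; simp
          rcases List.mem_flatMap.mp hy with ⟨w, hw, hyw⟩
          have hkw : key y = w := hkey w hw y hyw
          have hlt : key x < key y := by
            rcases List.mem_cons.mp hw with rfl | hw'
            · omega
            · have := hv w hw'; omega
          simpa using hlt
        have hins : insVal (key x) (v :: V) = key x :: v :: V := by simp [insVal, h1]
        have hcongV : V.flatMap (fun w => if w = key x then g w ++ [x] else g w)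
            = V.flatMap g := by
          apply List.flatMap_congr
          intro w hw
          have := hv w hw
          simp [show w ≠ key x by omega]
        rw [hhead, hins]
        simp only [List.flatMap_cons, hgx, List.nil_append, hcongV,
          if_neg (by omega : ¬ v = key x)]
        simp
      · -- key x = v : x is appended at the end of v's group
        have hf : ∀ y ∈ g v, (fun a b => decide (key a < key b)) x y = false := by
          intro y hy
          have := hgv y hy
          simp only [decide_eq_false_iff_not]
          omega
        have hcons : PySem.List.insertBy (fun a b => decide (key a < key b)) x
            (V.flatMap g) = x :: V.flatMap g := by
          apply insertBy_eq_cons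
          intro y t hyt
          have hy : y ∈ V.flatMap g := by rw [hyt]; simp
          rcases List.mem_flatMap.mp hy with ⟨w, hw, hyw⟩
          have := hkey w (by simp [hw]) y hyw
          have := hv w hw
          simp only [decide_eq_true_eq]
          omega
        have hins : insVal (key x) (v :: V) = v :: V := by
          simp [insVal, h1]
        have hcongV : V.flatMap (fun w => if w = key x then g w ++ [x] else g w)
            = V.flatMap g := by
          apply List.flatMap_congr
          intro w hw
          have := hv w hw
          have hwx : w ≠ key x := by omega
          simp [hwx]
        rw [List.flatMap_cons, insertBy_append_false _ _ _ _ hf, hcons, hins,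
          List.flatMap_cons, hcongV, if_pos h1.symm]
        simp
      · -- v < key x : skip past v's whole group and recurse
        have hf : ∀ y ∈ g v, (fun a b => decide (key a < key b)) x y = false := by
          intro y hy
          have := hgv y hy
          simp only [decide_eq_false_iff_not]
          omega
        have hgu' : key x ∉ V → g (key x) = [] := by
          intro h
          exact hgu (by
            intro hmem
            rcases List.mem_cons.mp hmem with h' | h'
            · omega
            · exact h h')
        have hins : insVal (key x) (v :: V) = v :: insVal (key x) V := by
          simp [insVal, show ¬ key x < v by omega, show ¬ key x = v by omega]
        rw [List.flatMap_cons, insertBy_append_false _ _ _ _ hf,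
          ih hV' (fun w hw => hkey w (by simp [hw])) (fun w hw => hne w (by simp [hw])) hgu',
          hins, List.flatMap_cons, if_neg (by omega : ¬ v = key x)]

-- stable sort by key = groups of equal key, by ascending key value, original order inside
theorem stable_sort_flat (key : Int → Int) (xs : List Int) :
    PySem.List.sorted xs (fun a => key a) =
      (PySem.List.sorted (PySem.Set.ofList (xs.map key)) (fun v => v)).flatMap
        (fun v => xs.filter (fun a => key a == v)) := by
  induction xs using List.reverseRecOn with
  | nil => rfl
  | append_singleton xs x ih =>
      rw [PySem.List.sorted_eq_foldl_insertBy, List.foldl_append, List.foldl_cons,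
        List.foldl_nil, ← PySem.List.sorted_eq_foldl_insertBy, ih]
      rw [insertBy_flat key x _ _ (PySem.List.sorted_ofList_pairwise_lt _)
        (by intro v _ a ha
            exact beq_iff_eq.mp (List.mem_filter.mp ha).2)
        (by intro v hv
            have hvmem : v ∈ xs.map key := by
              have := (PySem.List.mem_sorted _ _ _ _).mp hv
              rwa [PySem.Set.mem_ofList] at this
            rcases List.mem_map.mp hvmem with ⟨a, ha, rfl⟩
            exact List.ne_nil_of_mem (List.mem_filter.mpr ⟨ha, beq_self_eq_true _⟩))
        (by intro hnot
            rw [List.filter_eq_nil_iff]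
            intro a ha hbeq
            apply hnot
            rw [PySem.List.mem_sorted, PySem.Set.mem_ofList]
            exact (beq_iff_eq.mp hbeq) ▸ List.mem_map_of_mem ha)]
      rw [List.map_append, List.map_singleton, sorted_set_append]
      apply List.flatMap_congr
      intro v _
      rw [List.filter_append]
      by_cases hvx : v = key x
      · subst hvx
        simp
      · simp [hvx, Ne.symm hvx]

-- A's merging loop absorbs a run of equal-total players into currentPlayers
theorem run_const (tp : List Int) (l : List Int) (acc : List (List Int)) (c : Int) :
    ∀ (t : List Int), (∀ a ∈ l, PySem.List.pyGetD tp a 0 = PySem.List.pyGetD tp c 0) →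
    l.foldl (pvStepA tp) (acc, c :: t) = (acc, (c :: t) ++ l) := by
  induction l with
  | nil => intro t _; simp
  | cons a l ih =>
      intro t hl
      have h0 : PySem.List.pyGetD (c :: t) 0 0 = c := by simp [pysem]
      have hstep : pvStepA tp (acc, c :: t) a = (acc, c :: (t ++ [a])) := by
        simp [pvStepA, h0, hl a (by simp)]
      rw [List.foldl_cons, hstep, ih (t ++ [a]) (fun b hb => hl b (by simp [hb]))]
      simp

-- A's merging loop over a flatMap of key-groups emits each group followed by its padding
theorem grp_flat (tp : List Int) (g : Int → List Int) :
    ∀ (vals : List Int), vals.Pairwise (· < ·) →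
    (∀ v ∈ vals, ∀ a ∈ g v, PySem.List.pyGetD tp a 0 = v) →
    (∀ v ∈ vals, g v ≠ []) →
    ∀ (acc : List (List Int)) (c : Int) (t : List Int),
    (∀ a ∈ t, PySem.List.pyGetD tp a 0 = PySem.List.pyGetD tp c 0) →
    (∀ v ∈ vals, PySem.List.pyGetD tp c 0 < v) →
    (((vals.flatMap g).foldl (pvStepA tp) (acc, c :: t)).1 ++
      [((vals.flatMap g).foldl (pvStepA tp) (acc, c :: t)).2] ++
      pvPad ((vals.flatMap g).foldl (pvStepA tp) (acc, c :: t)).2) =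
      acc ++ [c :: t] ++ pvPad (c :: t) ++ vals.flatMap (fun v => [g v] ++ pvPad (g v)) := by
  intro vals
  induction vals with
  | nil => intro _ _ _ acc c t _ _; simp
  | cons v vs ih =>
      intro hV hkey hne acc c t ht hcv
      rcases List.pairwise_cons.mp hV with ⟨hv, hV'⟩
      rcases List.exists_cons_of_ne_nil (hne v (by simp)) with ⟨b, bs, hgv⟩
      have hkb : PySem.List.pyGetD tp b 0 = v := hkey v (by simp) b (by rw [hgv]; simp)
      have h0 : PySem.List.pyGetD (c :: t) 0 0 = c := by simp [pysem]
      have hstep : pvStepA tp (acc, c :: t) b =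
          (acc ++ [c :: t] ++ pvPad (c :: t), [b]) := by
        have hlt := hcv v (by simp)
        have : (PySem.List.pyGetD tp b 0 == PySem.List.pyGetD tp c 0) = false := by
          simp only [beq_eq_false_iff_ne, ne_eq]
          omega
        simp [pvStepA, h0, this]
      have hrun : bs.foldl (pvStepA tp) (acc ++ [c :: t] ++ pvPad (c :: t), [b]) =
          (acc ++ [c :: t] ++ pvPad (c :: t), g v) := by
        rw [run_const tp bs _ b [] (fun a ha => by
          rw [hkb, hkey v (by simp) a (by rw [hgv]; simp [ha])])]
        rw [hgv]
        rfl
      rw [List.flatMap_cons, hgv, List.foldl_append, List.foldl_cons, hstep, hrun, hgv]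
      rw [ih hV' (fun w hw => hkey w (by simp [hw])) (fun w hw => hne w (by simp [hw]))
        _ b bs
        (fun a ha => by rw [hkey v (by simp) a (by rw [hgv]; simp [ha]),
          hkey v (by simp) b (by rw [hgv]; simp)])
        (fun w hw => by rw [hkb]; exact hv w hw), ← hgv]
      simp [List.append_assoc]

-- B's bucket dictionary: its keys are set(totalPoints) …
theorem bucket_keys (tp : List Int) :
    ((PySem.List.enumerate tp).foldl
      (fun (d : PySem.Dict Int (List Int)) pp => d.modify pp.2 [] (fun l => l ++ [pp.1]))
      PySem.Dict.empty).keys = PySem.Set.ofList tp := by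
  have h := PySem.Dict.keys_foldl_modify_key (PySem.List.enumerate tp) (fun pp => pp.2)
    ([] : List Int) (fun _ pp => fun l => l ++ [pp.1]) PySem.Dict.empty
  simp only at h
  rw [h, PySem.List.map_snd_enumerate]
  rfl

-- … and each bucket is the list of players with that total, in index order
theorem bucket_getD (tp : List Int) (v : Int) :
    ((PySem.List.enumerate tp).foldl
      (fun (d : PySem.Dict Int (List Int)) pp => d.modify pp.2 [] (fun l => l ++ [pp.1]))
      PySem.Dict.empty).getD v []
    = (PySem.List.pyRange 0 ((tp.length : Int))).filter
        (fun j => PySem.List.pyGetD tp j 0 == v) := by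
  rw [← List.foldl_map (f := fun pp : Int × Int => (pp.2, pp.1))
      (g := fun (d : PySem.Dict Int (List Int)) p => d.modify p.1 [] (fun l => l ++ [p.2]))]
  rw [PySem.Dict.getD_foldl_modify_append]
  rw [PySem.List.enumerate_eq_map_pyRange tp 0]
  simp only [List.map_map, List.filter_map, Function.comp_def, PySem.List.len_eq]
  simp

-- every point total that occurs has a nonempty bucket
theorem bucket_ne_nil (tp : List Int) (v : Int) (hv : v ∈ tp) :
    (PySem.List.pyRange 0 ((tp.length : Int))).filter
      (fun j => PySem.List.pyGetD tp j 0 == v) ≠ [] := by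
  rcases List.mem_iff_getElem.mp hv with ⟨j, hj, hget⟩
  apply List.ne_nil_of_mem (a := (j : Int))
  rw [List.mem_filter]
  constructor
  · rw [PySem.List.mem_pyRange_one]
    constructor
    · positivity
    · exact_mod_cast hj
  · rw [PySem.List.pyGetD_natCast, List.getD_eq_getElem _ _ hj, hget]
    simp

-- ===== VERDICT (by name: the statement is the Claim_ definition above) =====
theorem combineRankings_spec : Claim_equal_combineRankings := by
  intro rankings _ hPre
  unfold Spec_combineRankings combineRankings combineRankings_alt
  dsimp only
  have hlen : (pvTotals rankings).length = (PySem.List.pyGetD rankings 0 []).length :=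
    pvTotals_length rankings
  set tp := pvTotals rankings with htp
  have htpne : tp ≠ [] := by
    intro h
    apply hPre.2.1
    rw [← hlen, h]
    rfl
  set g : Int → List Int :=
    fun v => (PySem.List.pyRange 0 ((tp.length : Int))).filter
      (fun j => PySem.List.pyGetD tp j 0 == v) with hgdef
  set vals := PySem.List.sorted (PySem.Set.ofList tp) (fun v => v) with hvalsdef
  have hVpair : vals.Pairwise (· < ·) := PySem.List.sorted_ofList_pairwise_lt tp
  have hkeyg : ∀ v, ∀ a ∈ g v, PySem.List.pyGetD tp a 0 = v := by
    intro v a ha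
    exact beq_iff_eq.mp (List.mem_filter.mp ha).2
  have hneg : ∀ v ∈ vals, g v ≠ [] := by
    intro v hv
    rw [hvalsdef, PySem.List.mem_sorted, PySem.Set.mem_ofList] at hv
    exact bucket_ne_nil tp v hv
  -- the B side: flatMap of buckets over ascending totals
  have hB : (PySem.List.sorted ((PySem.List.enumerate tp).foldl
        (fun (d : PySem.Dict Int (List Int)) pp => d.modify pp.2 [] (fun l => l ++ [pp.1]))
        PySem.Dict.empty).keys (fun v => v)).foldl
      (fun result pts =>
        result ++ [((PySem.List.enumerate tp).foldl
          (fun (d : PySem.Dict Int (List Int)) pp => d.modify pp.2 [] (fun l => l ++ [pp.1]))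
          PySem.Dict.empty).getD pts []] ++
        pvPad (((PySem.List.enumerate tp).foldl
          (fun (d : PySem.Dict Int (List Int)) pp => d.modify pp.2 [] (fun l => l ++ [pp.1]))
          PySem.Dict.empty).getD pts [])) []
      = vals.flatMap (fun v => [g v] ++ pvPad (g v)) := by
    rw [bucket_keys]
    have hbody : (fun (result : List (List Int)) pts =>
        result ++ [((PySem.List.enumerate tp).foldl
          (fun (d : PySem.Dict Int (List Int)) pp => d.modify pp.2 [] (fun l => l ++ [pp.1]))
          PySem.Dict.empty).getD pts []] ++
        pvPad (((PySem.List.enumerate tp).foldl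
          (fun (d : PySem.Dict Int (List Int)) pp => d.modify pp.2 [] (fun l => l ++ [pp.1]))
          PySem.Dict.empty).getD pts []))
        = fun result pts => result ++ ([g pts] ++ pvPad (g pts)) := by
      funext r p
      rw [bucket_getD]
      simp only [List.append_assoc]
      rfl
    rw [hbody, PySem.List.foldl_append_eq_flatMap, List.nil_append]
  -- the A side: the stable sort is the same flatMap of groups
  have hA : PySem.List.sorted
        (PySem.List.pyRange 0 (((PySem.List.pyGetD rankings 0 []).length : Int)))
        (fun x => PySem.List.pyGetD tp x 0)
      = vals.flatMap g := by
    rw [← hlen, stable_sort_flat (fun j => PySem.List.pyGetD tp j 0)]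
    rw [PySem.List.map_pyGetD_pyRange_zero' tp 0]
  have hvne : vals ≠ [] := by
    intro h
    rw [hvalsdef, PySem.List.sorted_eq_nil_iff] at h
    rcases List.exists_cons_of_ne_nil htpne with ⟨a, t, hat⟩
    have ha : a ∈ PySem.Set.ofList tp := (PySem.Set.mem_ofList tp a).mpr (by rw [hat]; simp)
    rw [h] at ha
    exact absurd ha (List.not_mem_nil)
  rcases List.exists_cons_of_ne_nil hvne with ⟨v0, vs, hv0⟩
  rcases List.exists_cons_of_ne_nil (hneg v0 (by rw [hv0]; simp)) with ⟨b, bs, hgv0⟩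
  have hkb : PySem.List.pyGetD tp b 0 = v0 := hkeyg v0 b (by rw [hgv0]; simp)
  rw [hB, hA, hv0, List.flatMap_cons, hgv0, List.cons_append]
  have hget0 : PySem.List.pyGetD (b :: (bs ++ vs.flatMap g)) 0 0 = b := by simp [pysem]
  rw [hget0, PySem.List.slice_from_one, List.tail_cons, List.foldl_append]
  rw [run_const tp bs [] b [] (fun a ha => by
    rw [hkb, hkeyg v0 a (by rw [hgv0]; simp [ha])])]
  simp only [List.singleton_append]
  have hgrp := grp_flat tp g vs
    (by rw [hv0] at hVpair; exact (List.pairwise_cons.mp hVpair).2)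
    (fun w _ a ha => hkeyg w a ha)
    (fun w hw => hneg w (by rw [hv0]; simp [hw]))
    [] b bs
    (fun a ha => by rw [hkb, hkeyg v0 a (by rw [hgv0]; simp [ha])])
    (fun w hw => by
      rw [hkb]
      rw [hv0] at hVpair
      exact (List.pairwise_cons.mp hVpair).1 w hw)
  rw [hgrp, ← hgv0, List.flatMap_cons]
  simp
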